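-- pv_equiv track=rewrite | github.com/speight-wq/merkle-envelope-tools | verify_vectors.py | check_merkle_proof_safe
-- ===== SOURCE A (Python) =====
-- def check_merkle_proof_safe(proof: list) -> bool:
--     """
--     Check if a Merkle proof is safe from CVE-2012-2459 attacks.
--
--     CVE-2012-2459: A malicious peer could construct a valid-looking Merkle proof
--     for a non-existent transaction by exploiting the duplication of odd nodes.
--
--     This function checks for:
--     1. Adjacent duplicate hashes (same hash at consecutive levels)
--     2. Wildcards at non-leaf positions
--     3. Wildcards with incorrect position (must be R)
--     4. Multiple wildcards (only one self-duplication makes sense)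
--
--     Args:
--         proof: Merkle proof list
--
--     Returns:
--         True if proof structure is safe
--     """
--     if not isinstance(proof, list):
--         return False
--
--     wildcard_count = 0
--     prev_hash = None
--
--     for i, step in enumerate(proof):
--         # Basic structure check
--         if not isinstance(step, dict):
--             return False
--         if "hash" not in step or "pos" not in step:
--             return False
--
--         h = step["hash"]
--         pos = step["pos"]
--
--         # Check 1: Wildcard constraints
--         if h == "*":
--             wildcard_count += 1
--
--             # Only one wildcard allowed
--             if wildcard_count > 1:
--                 return False
--
--             # Wildcard only valid at leaf level (index 0)
--             if i != 0:
--                 return False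
--
--             # Wildcard must have position R (self on left, duplicate on right)
--             if pos != "R":
--                 return False
--
--         # Check 2: No adjacent duplicate hashes
--         if h != "*" and prev_hash is not None and h == prev_hash:
--             return False
--
--         prev_hash = h
--
--     return True
-- ===== SOURCE B (Python) =====
-- def check_merkle_proof_safe(proof: list) -> bool:
--     if not isinstance(proof, list):
--         return False
--     # pass 1: structure
--     if not all(isinstance(s, dict) and "hash" in s and "pos" in s for s in proof):
--         return False
--     hashes = [s["hash"] for s in proof]
--     # pass 2: adjacency
--     for prev, cur in zip(hashes, hashes[1:]):
--         if cur == prev and cur != "*":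
--             return False
--     # pass 3: wildcards
--     wilds = [i for i, h in enumerate(hashes) if h == "*"]
--     if not wilds:
--         return True
--     return wilds == [0] and proof[0]["pos"] == "R"
-- ===== Notes on version B (the rewrite author's own statement) =====
-- stated objective: simpler
-- what changed: A's single stateful loop with an index, a wildcard counter and a previous-hash register is replaced by three independent passes: an all() structure check, an adjacency check over zip(hashes, hashes[1:]), and a collected wildcard-index list judged as a whole (empty, or exactly [0] with pos 'R').
import Mathlib
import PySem

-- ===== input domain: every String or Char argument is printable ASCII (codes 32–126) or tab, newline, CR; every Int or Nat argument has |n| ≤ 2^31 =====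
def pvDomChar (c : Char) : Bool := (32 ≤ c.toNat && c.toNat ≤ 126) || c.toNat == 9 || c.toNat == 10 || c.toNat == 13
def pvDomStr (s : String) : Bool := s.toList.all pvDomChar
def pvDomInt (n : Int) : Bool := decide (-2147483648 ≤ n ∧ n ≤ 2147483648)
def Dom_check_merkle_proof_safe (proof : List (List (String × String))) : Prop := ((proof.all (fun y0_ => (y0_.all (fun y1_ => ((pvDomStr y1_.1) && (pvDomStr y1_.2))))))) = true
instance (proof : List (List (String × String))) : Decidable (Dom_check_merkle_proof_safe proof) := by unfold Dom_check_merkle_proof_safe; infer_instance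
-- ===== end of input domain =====

-- B replaces A's single stateful loop (index, wildcard counter, previous-hash register, early returns)
-- with three independent passes: a structural all-check, an adjacency check over zipped consecutive
-- hash pairs, and a wildcard-index collection judged as a whole; objective: simpler.


-- first-match lookup in the association list representing a Python dict (both ports use it)
def pvGet (step : List (String × String)) (k : String) : Option String :=
  (step.find? (fun p => p.1 == k)).map (fun p => p.2)

-- ===== PORT A =====
-- A's loop: enumerate index i, wildcard counter, previous hash; early returns become Bool results.
def aLoop : List (List (String × String)) → Nat → Int → Option String → Bool
  | [], _, _, _ => true
  | step :: rest, i, wc, prev =>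
    match pvGet step "hash", pvGet step "pos" with
    | some h, some pos =>
      if h == "*" then
        let wc := wc + 1
        if wc > 1 then false
        else if i ≠ 0 then false
        else if pos ≠ "R" then false
        else aLoop rest (i + 1) wc (some h)       -- check 2 skipped since h == "*"
      else
        match prev with
        | some p => if h == p then false else aLoop rest (i + 1) wc (some h)
        | none => aLoop rest (i + 1) wc (some h)
    | _, _ => false

def check_merkle_proof_safe (proof : List (List (String × String))) : Bool :=
  aLoop proof 0 0 none

-- ===== PORT B =====
-- pass 1: every step carries both keys
def bWF (step : List (String × String)) : Bool :=
  (pvGet step "hash").isSome && (pvGet step "pos").isSome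
-- pass 2: adjacency over zipped consecutive pairs
def bAdj (hs : List String) : Bool :=
  (hs.zip hs.tail).all (fun pc => !(pc.2 == pc.1 && pc.2 != "*"))
-- pass 3: indices of wildcard hashes
def bWilds (hs : List String) : List Int :=
  ((PySem.List.enumerate hs).filter (fun ih => ih.2 == "*")).map (fun ih => ih.1)

def check_merkle_proof_safe_alt (proof : List (List (String × String))) : Bool :=
  if !(proof.all bWF) then false
  else
    let hashes := proof.map (fun s => (pvGet s "hash").getD "")
    if !(bAdj hashes) then false
    else
      match bWilds hashes with
      | [] => true
      | w => w == [0] && ((proof.head?.bind (fun s => pvGet s "pos")).getD "" == "R")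

-- ===== PRECONDITION & SPEC =====
def Spec_check_merkle_proof_safe (proof : List (List (String × String))) (out : Bool) : Prop := out = check_merkle_proof_safe_alt proof
instance (proof : List (List (String × String))) (out : Bool) : Decidable (Spec_check_merkle_proof_safe proof out) := by unfold Spec_check_merkle_proof_safe; infer_instance

-- ===== CLAIM (what is proved, stated in full; the proofs are below) =====
def Claim_equal_check_merkle_proof_safe : Prop := ∀ (proof : List (List (String × String))), Dom_check_merkle_proof_safe proof → Spec_check_merkle_proof_safe proof (check_merkle_proof_safe proof)

-- ===== LEMMAS AND PROOFS =====

-- no wildcard among hs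
def noWild (hs : List String) : Bool := hs.all (fun h => h != "*")

-- adjacency chain seeded with a previous hash
def pchain : String → List String → Bool
  | _, [] => true
  | p, h :: t => (h != p) && pchain h t

def hashesOf (proof : List (List (String × String))) : List String :=
  proof.map (fun s => (pvGet s "hash").getD "")

-- bWilds generalized over the enumerate start
def wAux (hs : List String) (s : Int) : List Int :=
  ((PySem.List.enumerate hs s).filter (fun ih => ih.2 == "*")).map (fun ih => ih.1)

lemma wAux_cons (h : String) (hs : List String) (s : Int) :
    wAux (h :: hs) s = (if h == "*" then [s] else []) ++ wAux hs (s + 1) := by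
  simp only [wAux, PySem.List.enumerate_cons, List.filter_cons]
  by_cases hw : h = "*" <;> simp [hw]

lemma wAux_nil_iff (hs : List String) (s : Int) :
    (wAux hs s = []) ↔ noWild hs = true := by
  induction hs generalizing s with
  | nil => simp [wAux, noWild]
  | cons h t ih =>
    rw [wAux_cons]
    by_cases hw : h = "*" <;> simp [hw, noWild, ih, bne]

lemma wAux_mem_ge (hs : List String) (s : Int) :
    ∀ x ∈ wAux hs s, s ≤ x := by
  induction hs generalizing s with
  | nil => simp [wAux]
  | cons h t ih =>
    rw [wAux_cons]
    intro x hx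
    rcases List.mem_append.mp hx with hx | hx
    · by_cases hw : h = "*" <;> simp [hw] at hx; omega
    · have := ih (s + 1) x hx; omega

lemma bAdj_noWild (h0 : String) (t : List String) (hn : noWild t = true) :
    bAdj (h0 :: t) = pchain h0 t := by
  induction t generalizing h0 with
  | nil => rfl
  | cons h t ih =>
    have h1 : (h != "*") = true ∧ noWild t = true := by
      simpa [noWild, Bool.and_eq_true] using hn
    have hb : (h == "*") = false := by
      have := h1.1; simp [bne] at this; simp [this]
    have hbt : (h != "*") = true := h1.1
    have := ih h h1.2
    simp only [bAdj, List.zip, List.tail, List.zipWith, List.all_cons, pchain, hbt,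
      Bool.and_true, bne] at this ⊢
    rw [this]
    simp [hb]

lemma tail_eq (rest : List (List (String × String))) (i : Nat) (hi : 1 ≤ i)
    (wc : Int) (p : String) :
    aLoop rest i wc (some p)
      = (rest.all bWF && (noWild (hashesOf rest) && pchain p (hashesOf rest))) := by
  induction rest generalizing i wc p with
  | nil => simp [aLoop, hashesOf, noWild, pchain]
  | cons step rest ih =>
    simp only [aLoop, hashesOf, List.map_cons, List.all_cons, noWild, pchain]
    cases hh : pvGet step "hash" with
    | none => simp [bWF, hh]
    | some h =>
      cases hp : pvGet step "pos" with
      | none => simp [bWF, hh, hp]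
      | some pos =>
        have hbwf : bWF step = true := by simp [bWF, hh, hp]
        by_cases hw : h = "*"
        · subst hw
          simp only [beq_self_eq_true, if_true]
          by_cases hwc : wc + 1 > 1
          · simp [hwc, hbwf, bne]
          · have hi0 : i ≠ 0 := by omega
            simp [hwc, hi0, hbwf, bne]
        · have hb1 : (h == "*") = false := by simp [hw]
          simp only [hb1, Bool.false_eq_true, if_false]
          by_cases he : h = p
          · subst he; simp [bne, hw, hh]
          · have hb2 : (h == p) = false := by simp [he]
            have := ih (i + 1) (by omega) wc h
            simp only [hashesOf, noWild] at this
            simp only [hb2, Bool.false_eq_true, if_false, this, hh, Option.getD_some,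
              hbwf, Bool.true_and, bne, hb1, Bool.not_false, Bool.and_true]

lemma bWilds_eq_wAux (hs : List String) : bWilds hs = wAux hs 0 := rfl

-- B restated through the proof-side pieces, for a head step carrying hash h and pos
lemma alt_cons (step : List (String × String)) (rest : List (List (String × String)))
    (h pos : String) (hh : pvGet step "hash" = some h) (hp : pvGet step "pos" = some pos) :
    check_merkle_proof_safe_alt (step :: rest)
      = (if !(rest.all bWF) then false
         else if !(bAdj (h :: hashesOf rest)) then false
         else match bWilds (h :: hashesOf rest) with
              | [] => true
              | w => w == [0] && (pos == "R")) := by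
  have hbwf : bWF step = true := by simp [bWF, hh, hp]
  simp only [check_merkle_proof_safe_alt, List.all_cons, hbwf, Bool.true_and, List.map_cons,
    hh, Option.getD_some, List.head?_cons, Option.bind_some, hp, hashesOf]

theorem check_merkle_proof_safe_spec : Claim_equal_check_merkle_proof_safe := by
  unfold Claim_equal_check_merkle_proof_safe
  intro proof _
  unfold Spec_check_merkle_proof_safe
  cases proof with
  | nil => decide
  | cons step rest =>
    show aLoop (step :: rest) 0 0 none = _
    cases hh : pvGet step "hash" with
    | none => simp [aLoop, hh, check_merkle_proof_safe_alt, bWF]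
    | some h =>
      cases hp : pvGet step "pos" with
      | none =>
        simp only [aLoop, hh, hp]
        simp [check_merkle_proof_safe_alt, bWF, hh, hp]
      | some pos =>
        rw [alt_cons step rest h pos hh hp]
        simp only [aLoop, hh, hp]
        rw [bWilds_eq_wAux, wAux_cons]
        by_cases hw : h = "*"
        · subst hw
          simp only [beq_self_eq_true, if_true, List.singleton_append]
          rw [if_neg (by omega : ¬ ((0 : Int) + 1 > 1)), if_neg (by omega : ¬ ((0 : Nat) ≠ 0))]
          by_cases hpos : pos = "R"
          · subst hpos
            simp only [bne_self_eq_false, Bool.false_eq_true, if_false,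
              beq_self_eq_true, Bool.and_true]
            rw [tail_eq rest (0 + 1) (by omega) (0 + 1) "*"]
            cases hall : rest.all bWF with
            | false => simp
            | true =>
              simp only [Bool.true_and]
              cases hnw : noWild (hashesOf rest) with
              | false =>
                have hne : wAux (hashesOf rest) (0 + 1) ≠ [] := by
                  intro hc
                  rw [(wAux_nil_iff _ _).mp hc] at hnw; exact Bool.false_ne_true hnw.symm
                cases hws : wAux (hashesOf rest) (0 + 1) with
                | nil => exact absurd hws hne
                | cons w ws =>
                  simp only [Bool.false_and, List.cons.injEq]
                  cases hadj : bAdj ("*" :: hashesOf rest) <;> simp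
              | true =>
                have hnil : wAux (hashesOf rest) (0 + 1) = [] := (wAux_nil_iff _ _).mpr hnw
                rw [bAdj_noWild "*" (hashesOf rest) hnw, hnil]
                simp only [Bool.true_and]
                cases hpc : pchain "*" (hashesOf rest) <;> simp
          · have hbp : (pos == "R") = false := by simp [hpos]
            have : (pos != "R") = true := by simp [bne, hpos]
            simp only [this, if_true, hbp, Bool.and_false]
            cases h3 : (!rest.all bWF) <;>
              cases h4 : (!bAdj ("*" :: hashesOf rest)) <;> simp [hbp, hpos]
        · have hb1 : (h == "*") = false := by simp [hw]
          simp only [hb1, Bool.false_eq_true, if_false, List.nil_append]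
          rw [tail_eq rest (0 + 1) (by omega) 0 h]
          cases hall : rest.all bWF with
          | false => simp
          | true =>
            simp only [Bool.true_and]
            cases hnw : noWild (hashesOf rest) with
            | false =>
              have hne : wAux (hashesOf rest) (0 + 1) ≠ [] := by
                intro hc
                rw [(wAux_nil_iff _ _).mp hc] at hnw; exact Bool.false_ne_true hnw.symm
              cases hws : wAux (hashesOf rest) (0 + 1) with
              | nil => exact absurd hws hne
              | cons w ws =>
                have hwge : (1 : Int) ≤ w := by
                  have := wAux_mem_ge (hashesOf rest) (0 + 1) w (by rw [hws]; exact List.mem_cons_self ..)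
                  omega
                have hw0 : (w == (0 : Int)) = false := by
                  have : w ≠ 0 := by omega
                  simp [this]
                simp only [Bool.false_and, List.cons_beq_cons, hw0, Bool.false_and,
                  Bool.and_false]
                cases hadj : bAdj (h :: hashesOf rest) <;> simp
            | true =>
              have hnil : wAux (hashesOf rest) (0 + 1) = [] := (wAux_nil_iff _ _).mpr hnw
              rw [bAdj_noWild h (hashesOf rest) hnw, hnil]
              simp only [Bool.true_and]
              cases hpc : pchain h (hashesOf rest) <;> simp
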